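-- pv_equiv track=rewrite | github.com/Jadaunkg/Tickzen | Sports_Article_Automation/utilities/article_filter.py | _filter_by_keywords_exclude
-- ===== SOURCE A (Python) =====
-- from typing import Dict, List, Optional, Set, Union
--
-- def _filter_by_keywords_exclude(articles: List[Dict], keywords: List[str]) -> List[Dict]:
--     """Exclude articles containing specified keywords"""
--     keywords_lower = [k.lower() for k in keywords]
--
--     filtered = []
--     for article in articles:
--         text = f"{article.get('title', '')} {article.get('summary', '')}".lower()
--         if not any(keyword in text for keyword in keywords_lower):
--             filtered.append(article)
--
--     return filtered
-- ===== SOURCE B (Python) =====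
-- def _filter_by_keywords_exclude(articles, keywords):
--     """Exclude articles containing specified keywords (keyword-major iterative filtering)."""
--     # pair each article with its searchable text once
--     pairs = [(article,
--               (article.get('title', '') + ' ' + article.get('summary', '')).lower())
--              for article in articles]
--     # each keyword pass discards the articles it hits; survivors shrink monotonically
--     for keyword in keywords:
--         k = keyword.lower()
--         pairs = [p for p in pairs if k not in p[1]]
--     return [article for article, _ in pairs]
-- ===== Notes on version B (the rewrite author's own statement) =====
-- stated objective: alternative
-- what changed: A loops article-major, testing every lowered keyword against each article's text and appending survivors to an accumulator; B pairs each article with its lowered text once and then loops keyword-major, each keyword pass filtering the shrinking survivor list, projecting the articles back at the end.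
import Mathlib
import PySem

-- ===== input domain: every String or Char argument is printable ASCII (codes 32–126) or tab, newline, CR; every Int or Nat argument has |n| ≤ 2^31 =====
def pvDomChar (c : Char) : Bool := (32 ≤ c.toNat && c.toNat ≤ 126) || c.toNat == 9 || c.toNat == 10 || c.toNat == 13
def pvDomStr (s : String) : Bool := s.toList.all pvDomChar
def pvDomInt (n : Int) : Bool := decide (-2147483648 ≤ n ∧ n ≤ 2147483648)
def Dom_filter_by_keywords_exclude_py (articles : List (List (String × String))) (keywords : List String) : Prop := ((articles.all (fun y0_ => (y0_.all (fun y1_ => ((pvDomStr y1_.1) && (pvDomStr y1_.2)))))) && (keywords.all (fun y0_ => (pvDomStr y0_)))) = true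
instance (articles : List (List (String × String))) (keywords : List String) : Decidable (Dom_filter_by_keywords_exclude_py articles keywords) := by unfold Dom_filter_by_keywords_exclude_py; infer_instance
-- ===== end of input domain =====

-- B pairs each article with its lowered text once, then filters the survivor list once per
-- keyword (loop interchange: keyword-major instead of article-major); objective: alternative.


-- ===== PORT A =====
-- text = f"{article.get('title','')} {article.get('summary','')}".lower() (on the List Char side)
def pvTextOf (article : List (String × String)) : List Char :=
  PySem.Chars.lower ((PySem.Dict.getD (PySem.Dict.mk article) "title" "").toList
    ++ [' '] ++ (PySem.Dict.getD (PySem.Dict.mk article) "summary" "").toList)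

def filter_by_keywords_exclude_py (articles : List (List (String × String))) (keywords : List String) : List (List (String × String)) :=
  let keywords_lower := keywords.map (fun k => PySem.Chars.lower k.toList)
  articles.foldl (fun filtered article =>
    let text := pvTextOf article
    if keywords_lower.any (fun keyword => PySem.Chars.isIn keyword text) then filtered
    else filtered ++ [article]) []

-- ===== PORT B =====
def filter_by_keywords_exclude_py_alt (articles : List (List (String × String))) (keywords : List String) : List (List (String × String)) :=
  let pairs := articles.map (fun article => (article, pvTextOf article))
  let survivors := keywords.foldl (fun ps keyword =>
    let k := PySem.Chars.lower keyword.toList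
    ps.filter (fun p => !(PySem.Chars.isIn k p.2))) pairs
  survivors.map Prod.fst

-- ===== PRECONDITION & SPEC =====
def Spec_filter_by_keywords_exclude_py (articles : List (List (String × String))) (keywords : List String) (out : List (List (String × String))) : Prop := out = filter_by_keywords_exclude_py_alt articles keywords
instance (articles : List (List (String × String))) (keywords : List String) (out : List (List (String × String))) : Decidable (Spec_filter_by_keywords_exclude_py articles keywords out) := by unfold Spec_filter_by_keywords_exclude_py; infer_instance

-- ===== CLAIM (what is proved, stated in full; the proofs are below) =====
def Claim_equal_filter_by_keywords_exclude_py : Prop := ∀ (articles : List (List (String × String))) (keywords : List String), Dom_filter_by_keywords_exclude_py articles keywords → Spec_filter_by_keywords_exclude_py articles keywords (filter_by_keywords_exclude_py articles keywords)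

-- ===== LEMMAS AND PROOFS =====
-- "no mapped-lowered keyword occurs" (A's test, negated) = "every keyword, lowered in place, is absent" (B's cascade test)
lemma pv_notany_eq_all (keywords : List String) (cs : List Char) :
    (!((keywords.map fun k => PySem.Chars.lower k.toList).any fun kw => PySem.Chars.isIn kw cs))
    = (keywords.all fun kw => !(PySem.Chars.isIn (PySem.Chars.lower kw.toList) cs)) := by
  induction keywords with
  | nil => rfl
  | cons k t ih => simp only [List.map_cons, List.any_cons, List.all_cons, Bool.not_or, ih]

-- the keyword-major filtering cascade equals one filter by "no keyword occurs"
lemma pv_foldl_filter_eq (kws : List String) (ps : List ((List (String × String)) × List Char)) :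
    kws.foldl (fun ps keyword =>
        ps.filter (fun p => !(PySem.Chars.isIn (PySem.Chars.lower keyword.toList) p.2))) ps
    = ps.filter (fun p => kws.all fun kw => !(PySem.Chars.isIn (PySem.Chars.lower kw.toList) p.2)) := by
  induction kws generalizing ps with
  | nil => simp
  | cons k t ih =>
    rw [List.foldl_cons, ih, List.filter_filter]
    apply List.filter_congr
    intro p _
    rw [List.all_cons]
    cases PySem.Chars.isIn (PySem.Chars.lower k.toList) p.2 <;>
      cases t.all fun kw => !(PySem.Chars.isIn (PySem.Chars.lower kw.toList) p.2) <;> rfl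

-- filtering the (article, text) pairs and projecting = filtering the articles directly
lemma pv_filter_map_fst (keywords : List String) (articles : List (List (String × String))) :
    ((articles.map (fun a => (a, pvTextOf a))).filter
        (fun p => keywords.all fun kw => !(PySem.Chars.isIn (PySem.Chars.lower kw.toList) p.2))).map Prod.fst
    = articles.filter (fun a => keywords.all fun kw =>
        !(PySem.Chars.isIn (PySem.Chars.lower kw.toList) (pvTextOf a))) := by
  induction articles with
  | nil => rfl
  | cons a t ih =>
    simp only [List.map_cons, List.filter_cons]
    by_cases h : (keywords.all fun kw =>
        !(PySem.Chars.isIn (PySem.Chars.lower kw.toList) (pvTextOf a))) = true <;> simp [h, ih]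

-- ===== VERDICT (by name: the statement is the Claim_ definition above) =====
theorem filter_by_keywords_exclude_py_spec : Claim_equal_filter_by_keywords_exclude_py := by
  intro articles keywords _
  unfold Spec_filter_by_keywords_exclude_py filter_by_keywords_exclude_py filter_by_keywords_exclude_py_alt
  simp only [pv_foldl_filter_eq, pv_filter_map_fst]
  have hfun : (fun (filtered : List (List (String × String))) article =>
      if (keywords.map (fun k => PySem.Chars.lower k.toList)).any
          (fun keyword => PySem.Chars.isIn keyword (pvTextOf article)) then filtered
      else filtered ++ [article])
    = (fun filtered article =>
      if (keywords.all fun kw => !(PySem.Chars.isIn (PySem.Chars.lower kw.toList) (pvTextOf article)))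
      then filtered ++ [article] else filtered) := by
    funext filtered article
    rw [← pv_notany_eq_all]
    cases hx : (keywords.map fun k => PySem.Chars.lower k.toList).any
        (fun kw => PySem.Chars.isIn kw (pvTextOf article)) <;> simp
  rw [hfun, PySem.List.foldl_append_if_eq_filter]
  simp
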